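-- pv_equiv track=rewrite | github.com/a6p/WS2812-led-service | led_server.py | encode_byte
-- ===== SOURCE A (Python) =====
-- def encode_byte(byte):
--     #Преобразуем каждый бит WS2812B в 3-битное SPI-представление
--     result = []
--     for i in range(8):
--         bit = (byte >> (7 - i)) & 1
--         if bit:
--             result += [0b110]  # лог.1 -> "длинный импульс"
--         else:
--             result += [0b100]  # лог.0 -> "короткий импульс"
--     return result
-- ===== SOURCE B (Python) =====
-- # Lookup table of every byte encoding, built once with the same bit logic; encode_byte is a single indexed copy.
-- TABLE = [[0b110 if (v >> (7 - i)) & 1 else 0b100 for i in range(8)] for v in range(256)]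
--
--
-- def encode_byte(byte):
--     return list(TABLE[byte % 256])
-- ===== Notes on version B (the rewrite author's own statement) =====
-- stated objective: idiomatic
-- what changed: Replaces the per-call per-bit loop with a module-level lookup table of all byte encodings built once; encode_byte becomes a single table lookup (index reduced modulo the table length) plus a list copy.
import Mathlib
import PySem

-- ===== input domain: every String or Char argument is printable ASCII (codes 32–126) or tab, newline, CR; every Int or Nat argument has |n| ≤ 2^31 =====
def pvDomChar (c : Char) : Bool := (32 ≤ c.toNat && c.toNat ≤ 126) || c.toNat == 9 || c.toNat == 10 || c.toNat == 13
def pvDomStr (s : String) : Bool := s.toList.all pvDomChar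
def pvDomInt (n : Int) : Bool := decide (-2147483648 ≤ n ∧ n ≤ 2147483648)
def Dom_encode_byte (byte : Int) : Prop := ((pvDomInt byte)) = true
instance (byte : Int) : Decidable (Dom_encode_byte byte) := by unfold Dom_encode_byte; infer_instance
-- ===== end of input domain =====

-- B replaces A's per-call bit loop by a table of all byte encodings precomputed once at module load (idiomatic lookup-table form).


-- ===== PORT A =====
def encode_byte (byte : Int) : List Int :=
  (PySem.List.pyRange 0 8 1).foldl (fun result i =>
    let bit := PySem.Int.band (byte >>> (7 - i).toNat) 1
    if bit ≠ 0 then result ++ [0b110] else result ++ [0b100]) []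

-- ===== PORT B =====
def pvTable : List (List Int) :=
  (PySem.List.pyRange 0 256 1).map (fun v =>
    (PySem.List.pyRange 0 8 1).map (fun i =>
      if PySem.Int.band (v >>> (7 - i).toNat) 1 ≠ 0 then 0b110 else 0b100))

def encode_byte_alt (byte : Int) : List Int :=
  PySem.List.pyGetD pvTable (PySem.Int.mod byte 256) []

-- ===== PRECONDITION & SPEC =====
def Spec_encode_byte (byte : Int) (out : List Int) : Prop := out = encode_byte_alt byte
instance (byte : Int) (out : List Int) : Decidable (Spec_encode_byte byte out) := by unfold Spec_encode_byte; infer_instance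

-- ===== CLAIM (what is proved, stated in full; the proofs are below) =====
def Claim_equal_encode_byte : Prop := ∀ (byte : Int), Dom_encode_byte byte → Spec_encode_byte byte (encode_byte byte)

-- ===== LEMMAS AND PROOFS =====

theorem pv_mod2 (a : Int) : PySem.Int.mod a 2 = a % 2 :=
  PySem.Int.mod_eq_emod_of_pos (by norm_num)

theorem pv_mod256 (a : Int) : PySem.Int.mod a 256 = a % 256 :=
  PySem.Int.mod_eq_emod_of_pos (by norm_num)

-- bit k of byte (k < 8) depends only on byte % 256
theorem pv_keybit (b : Int) (k : Nat) (hk : k < 8) :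
    ((b % 256) >>> k) % 2 = (b >>> k) % 2 := by
  rw [Int.shiftRight_eq_div_pow, Int.shiftRight_eq_div_pow]
  interval_cases k <;> push_cast <;> omega

theorem pv_ite_app (c : Prop) [Decidable c] (x : List Int) (a b : Int) :
    (if c then x ++ [a] else x ++ [b]) = x ++ [if c then a else b] := by
  by_cases h : c <;> simp [h]

theorem pv_main (byte : Int) : encode_byte byte = encode_byte_alt byte := by
  unfold encode_byte encode_byte_alt pvTable
  rw [PySem.List.pyGetD_map_pyRange_of_nonneg _ 256 _ _
      (PySem.Int.mod_nonneg byte (by norm_num)) (PySem.Int.mod_lt byte (by norm_num))]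
  simp only [show PySem.List.pyRange 0 8 1 = [0,1,2,3,4,5,6,7] from by decide,
    List.foldl, List.map]
  simp only [show ((7:Int) - 0).toNat = 7 from rfl, show ((7:Int) - 1).toNat = 6 from rfl,
    show ((7:Int) - 2).toNat = 5 from rfl, show ((7:Int) - 3).toNat = 4 from rfl,
    show ((7:Int) - 4).toNat = 3 from rfl, show ((7:Int) - 5).toNat = 2 from rfl,
    show ((7:Int) - 6).toNat = 1 from rfl, show ((7:Int) - 7).toNat = 0 from rfl]
  simp only [Int.shiftRight_natCast_right]
  simp only [PySem.Int.band_one, pv_mod2, pv_mod256]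
  simp only [pv_keybit byte 0 (by norm_num), pv_keybit byte 1 (by norm_num),
    pv_keybit byte 2 (by norm_num), pv_keybit byte 3 (by norm_num),
    pv_keybit byte 4 (by norm_num), pv_keybit byte 5 (by norm_num),
    pv_keybit byte 6 (by norm_num), pv_keybit byte 7 (by norm_num)]
  simp only [pv_ite_app]
  simp only [List.nil_append, List.cons_append]

-- ===== VERDICT (by name: the statement is the Claim_ definition above) =====
theorem encode_byte_spec : Claim_equal_encode_byte := by
  intro byte _
  exact pv_main byte
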